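-- pv_equiv track=rewrite | github.com/QCFD-Lab/qlbm | test/unit/spacetime/d2q4_circle_test.py | non_intersecting_lists
-- ===== SOURCE A (Python) =====
-- from typing import List, Set, Tuple
--
-- def non_intersecting_lists(lists: List[List[Tuple[int, int]]]) -> bool:
--     seen: Set[Tuple[int, int]] = set()
--
--     for sublist in lists:
--         sublist_set = set(sublist)
--         if seen & sublist_set:
--             return False
--         seen.update(sublist_set)
--
--     return True
-- ===== SOURCE B (Python) =====
-- def non_intersecting_lists(lists):
--     total = sum(len(set(sub)) for sub in lists)
--     union = {x for sub in lists for x in sub}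
--     return total == len(union)
-- ===== Notes on version B (the rewrite author's own statement) =====
-- stated objective: alternative
-- what changed: Replaces the sequential seen-set loop with an early-exit intersection test by a counting argument: the sum of per-sublist deduplicated sizes equals the size of the global union iff no element is shared.
import Mathlib
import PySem

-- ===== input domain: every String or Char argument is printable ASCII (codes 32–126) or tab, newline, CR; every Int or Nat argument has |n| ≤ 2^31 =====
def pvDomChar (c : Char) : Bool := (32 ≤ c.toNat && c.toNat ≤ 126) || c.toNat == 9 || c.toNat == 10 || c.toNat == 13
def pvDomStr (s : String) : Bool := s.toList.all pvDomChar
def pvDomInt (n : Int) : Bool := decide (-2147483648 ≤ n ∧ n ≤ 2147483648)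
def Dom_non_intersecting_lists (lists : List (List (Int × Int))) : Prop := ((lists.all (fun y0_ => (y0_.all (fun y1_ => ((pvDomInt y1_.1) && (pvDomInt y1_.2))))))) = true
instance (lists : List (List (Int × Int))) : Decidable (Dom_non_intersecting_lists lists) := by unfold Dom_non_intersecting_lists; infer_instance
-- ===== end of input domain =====

-- B replaces A's sequential seen-set loop (early exit on a nonempty intersection) by a
-- counting comparison: sum of per-sublist deduplicated sizes vs size of the global union
-- (an alternative decomposition; same asymptotic cost).

-- ===== PORT A =====
-- the 'for sublist in lists' loop with accumulator 'seen'; early 'return False' = the first branch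
def nilGoA (seen : PySem.Set (Int × Int)) : List (List (Int × Int)) → Bool
  | [] => true
  | sub :: rest =>
    let ss := PySem.Set.ofList sub
    if !(PySem.Set.inter seen ss).isEmpty then false
    else nilGoA (PySem.Set.update seen ss) rest

def non_intersecting_lists (lists : List (List (Int × Int))) : Bool :=
  nilGoA PySem.Set.empty lists

-- ===== PORT B =====
def non_intersecting_lists_alt (lists : List (List (Int × Int))) : Bool :=
  let total := (lists.map (fun sub => PySem.Set.len (PySem.Set.ofList sub))).sum
  let union := PySem.Set.ofList lists.flatten   -- the set comprehension over the nested iteration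
  decide (total = PySem.Set.len union)

-- ===== PRECONDITION & SPEC =====
def Spec_non_intersecting_lists (lists : List (List (Int × Int))) (out : Bool) : Prop := out = non_intersecting_lists_alt lists
instance (lists : List (List (Int × Int))) (out : Bool) : Decidable (Spec_non_intersecting_lists lists out) := by unfold Spec_non_intersecting_lists; infer_instance

-- ===== CLAIM (what is proved, stated in full; the proofs are below) =====
def Claim_equal_non_intersecting_lists : Prop := ∀ (lists : List (List (Int × Int))), Dom_non_intersecting_lists lists → Spec_non_intersecting_lists lists (non_intersecting_lists lists)

-- ===== LEMMAS AND PROOFS =====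

-- the two branch equations of A's loop
theorem pv_nilGoA_pos (seen : PySem.Set (Int × Int)) (sub : List (Int × Int))
    (rest : List (List (Int × Int)))
    (hE : (PySem.Set.inter seen (PySem.Set.ofList sub)).isEmpty = false) :
    nilGoA seen (sub :: rest) = false := by
  simp [nilGoA, hE]

theorem pv_nilGoA_neg (seen : PySem.Set (Int × Int)) (sub : List (Int × Int))
    (rest : List (List (Int × Int)))
    (hE : (PySem.Set.inter seen (PySem.Set.ofList sub)).isEmpty = true) :
    nilGoA seen (sub :: rest)
      = nilGoA (PySem.Set.update seen (PySem.Set.ofList sub)) rest := by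
  simp [nilGoA, hE]

-- adding an element: the two cases, in membership form
theorem pv_add_of_mem (s : PySem.Set (Int × Int)) (x : Int × Int)
    (h : x ∈ s) : PySem.Set.add s x = s := by
  simp [PySem.Set.add, h]

theorem pv_add_of_not_mem (s : PySem.Set (Int × Int)) (x : Int × Int)
    (h : x ∉ s) : PySem.Set.add s x = s ++ [x] := by
  simp [PySem.Set.add, h]

-- membership in an update
theorem pv_mem_update (u s : List (Int × Int)) (y : Int × Int) :
    y ∈ PySem.Set.update s u ↔ y ∈ s ∨ y ∈ u := by
  induction u generalizing s with
  | nil => simp [PySem.Set.update]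
  | cons x u ih =>
    show y ∈ PySem.Set.update (PySem.Set.add s x) u ↔ _
    rw [ih, PySem.Set.mem_add]
    simp only [List.mem_cons]
    tauto

-- updating with an already-built set is the same as updating with the raw list
theorem pv_update_foldl (t u s : List (Int × Int)) :
    PySem.Set.update s (List.foldl PySem.Set.add u t)
      = PySem.Set.update (PySem.Set.update s u) t := by
  induction t generalizing u with
  | nil => rfl
  | cons x t ih =>
    show PySem.Set.update s (List.foldl PySem.Set.add (PySem.Set.add u x) t)
        = PySem.Set.update (PySem.Set.add (PySem.Set.update s u) x) t
    by_cases hx : x ∈ u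
    · rw [pv_add_of_mem u x hx,
        pv_add_of_mem _ x ((pv_mem_update u s x).mpr (Or.inr hx))]
      exact ih u
    · rw [pv_add_of_not_mem u x hx, ih (u ++ [x])]
      show PySem.Set.update (List.foldl PySem.Set.add s (u ++ [x])) t = _
      rw [List.foldl_append]
      rfl

theorem pv_update_ofList (t s : List (Int × Int)) :
    PySem.Set.update s (PySem.Set.ofList t) = PySem.Set.update s t := by
  have := pv_update_foldl t [] s
  simpa [PySem.Set.ofList, PySem.Set.update] using this

-- length bound of an update
theorem pv_len_update_le (t s : List (Int × Int)) :
    (PySem.Set.update s t).length ≤ s.length + t.length := by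
  induction t generalizing s with
  | nil => simp [PySem.Set.update]
  | cons x t ih =>
    show (PySem.Set.update (PySem.Set.add s x) t).length ≤ s.length + (t.length + 1)
    have h := ih (PySem.Set.add s x)
    have : (PySem.Set.add s x).length ≤ s.length + 1 := by
      simp only [PySem.Set.add]; split <;> simp
    omega

-- disjoint update: every element is new, lengths add exactly
theorem pv_len_update_disjoint (t s : List (Int × Int)) (hnd : t.Nodup)
    (h : ∀ x ∈ t, x ∉ s) :
    (PySem.Set.update s t).length = s.length + t.length := by
  induction t generalizing s with
  | nil => simp [PySem.Set.update]
  | cons x t ih =>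
    show (PySem.Set.update (PySem.Set.add s x) t).length = s.length + (t.length + 1)
    rw [pv_add_of_not_mem s x (h x (by simp))]
    rw [ih (s ++ [x]) (List.Nodup.of_cons hnd)]
    · simp; omega
    · intro y hy
      simp only [List.mem_append, List.mem_singleton]
      rintro (hys | rfl)
      · exact h y (by simp [hy]) hys
      · exact (List.nodup_cons.mp hnd).1 hy

-- an overlapping element makes the update strictly shorter than the sum
theorem pv_len_update_lt (t s : List (Int × Int)) (x : Int × Int)
    (hxt : x ∈ t) (hxs : x ∈ s) :
    (PySem.Set.update s t).length < s.length + t.length := by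
  induction t generalizing s with
  | nil => cases hxt
  | cons y t ih =>
    show (PySem.Set.update (PySem.Set.add s y) t).length < s.length + (t.length + 1)
    by_cases hy : y ∈ s
    · rw [pv_add_of_mem s y hy]
      have := pv_len_update_le t s
      omega
    · rw [pv_add_of_not_mem s y hy]
      have hxt' : x ∈ t := by
        rcases List.mem_cons.mp hxt with rfl | h'
        · exact absurd hxs hy
        · exact h'
      have := ih (s ++ [y]) hxt' (by simp [hxs])
      simp only [List.length_append, List.length_singleton] at this
      omega

-- a nonempty intersection yields a witness in both sets
theorem pv_inter_witness (s t : PySem.Set (Int × Int))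
    (h : (PySem.Set.inter s t).isEmpty = false) :
    ∃ x, x ∈ t ∧ x ∈ s := by
  rw [List.isEmpty_eq_false_iff, ← List.length_pos_iff_ne_nil] at h
  rcases List.exists_mem_of_length_pos h with ⟨x, hx⟩
  have hx' := List.mem_filter.mp hx
  refine ⟨x, ?_, hx'.1⟩
  simpa using hx'.2

-- empty intersection: no element of the new set is already seen
theorem pv_inter_empty (s t : PySem.Set (Int × Int))
    (h : (PySem.Set.inter s t).isEmpty = true) :
    ∀ x ∈ t, x ∉ s := by
  intro x hxt hxs
  rw [List.isEmpty_iff] at h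
  have : x ∈ PySem.Set.inter s t := by
    simp only [PySem.Set.inter, List.mem_filter]
    exact ⟨hxs, by simpa using hxt⟩
  rw [h] at this
  cases this

-- the union of the flattened tail is bounded by the sum of deduplicated sizes
theorem pv_len_update_flatten_le (rest : List (List (Int × Int))) (u : List (Int × Int)) :
    (PySem.Set.update u rest.flatten).length
      ≤ u.length + (rest.map (fun sub => (PySem.Set.ofList sub).length)).sum := by
  induction rest generalizing u with
  | nil => simp [PySem.Set.update]
  | cons r rest ih =>
    have hsplit : PySem.Set.update u (r :: rest).flatten
        = PySem.Set.update (PySem.Set.update u r) rest.flatten := by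
      show List.foldl PySem.Set.add u (r ++ rest.flatten) = _
      rw [List.foldl_append]; rfl
    rw [hsplit]
    have ha := ih (PySem.Set.update u r)
    have hb : (PySem.Set.update u r).length ≤ u.length + (PySem.Set.ofList r).length := by
      rw [← pv_update_ofList]
      exact pv_len_update_le (PySem.Set.ofList r) u
    simp only [List.map_cons, List.sum_cons]
    omega

-- the sum of Int lengths is the cast of the sum of Nat lengths
theorem pv_sum_cast (ls : List (List (Int × Int))) :
    (ls.map (fun sub => PySem.Set.len (PySem.Set.ofList sub))).sum
      = ((ls.map (fun sub => (PySem.Set.ofList sub).length)).sum : Int) := by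
  induction ls with
  | nil => rfl
  | cons s ls ih =>
    simp only [List.map_cons, List.sum_cons]
    rw [ih]
    simp only [PySem.Set.len]
    push_cast
    ring

-- main invariant for A's loop
theorem pv_nilGoA_eq (ls : List (List (Int × Int))) (seen : PySem.Set (Int × Int)) :
    nilGoA seen ls
      = decide ((ls.map (fun sub => (PySem.Set.ofList sub).length)).sum + seen.length
          = (PySem.Set.update seen ls.flatten).length) := by
  induction ls generalizing seen with
  | nil => simp [nilGoA, PySem.Set.update]
  | cons sub rest ih =>
    have hflat : PySem.Set.update seen (sub :: rest).flatten
        = PySem.Set.update (PySem.Set.update seen (PySem.Set.ofList sub)) rest.flatten := by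
      rw [pv_update_ofList]
      show List.foldl PySem.Set.add seen (sub ++ rest.flatten) = _
      rw [List.foldl_append]
      rfl
    cases hE : (PySem.Set.inter seen (PySem.Set.ofList sub)).isEmpty with
    | false =>
      rcases pv_inter_witness seen (PySem.Set.ofList sub) hE with ⟨x, hxt, hxs⟩
      have h1 : (PySem.Set.update seen (PySem.Set.ofList sub)).length
          < seen.length + (PySem.Set.ofList sub).length :=
        pv_len_update_lt (PySem.Set.ofList sub) seen x hxt hxs
      have h3 := pv_len_update_flatten_le rest (PySem.Set.update seen (PySem.Set.ofList sub))
      rw [pv_nilGoA_pos seen sub rest hE, hflat, eq_comm]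
      simp only [List.map_cons, List.sum_cons, decide_eq_false_iff_not]
      omega
    | true =>
      have hdisj := pv_inter_empty seen (PySem.Set.ofList sub) hE
      have hlen : (PySem.Set.update seen (PySem.Set.ofList sub)).length
          = seen.length + (PySem.Set.ofList sub).length :=
        pv_len_update_disjoint (PySem.Set.ofList sub) seen (PySem.Set.nodup_ofList sub) hdisj
      rw [pv_nilGoA_neg seen sub rest hE, ih, hflat]
      apply decide_eq_decide.mpr
      simp only [List.map_cons, List.sum_cons, hlen]
      omega

-- ===== VERDICT (by name: the statement is the Claim_ definition above) =====
theorem non_intersecting_lists_spec : Claim_equal_non_intersecting_lists := by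
  intro lists _
  show non_intersecting_lists lists = non_intersecting_lists_alt lists
  unfold non_intersecting_lists non_intersecting_lists_alt
  rw [pv_nilGoA_eq, pv_sum_cast]
  have h : PySem.Set.update PySem.Set.empty lists.flatten
      = PySem.Set.ofList lists.flatten := rfl
  rw [h]
  apply decide_eq_decide.mpr
  simp only [PySem.Set.len, PySem.Set.empty, List.length_nil]
  omega
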